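-- pv_equiv track=rewrite | github.com/Harrywang18/3dgs-streaming-system | SGSS/allocate_tokens.py | choose_T
-- ===== SOURCE A (Python) =====
-- T0_FIXED = 100  # L0 输入固定 token 数
--
-- BUCKETS = {
--     1: [  # Δ1
--         (1000, 64),
--         (4000, 128),
--         (float("inf"), 256),
--     ],
--     2: [  # Δ2
--         (2000, 128),
--         (8000, 256),
--         (float("inf"), 384),
--     ],
--     3: [  # Δ3
--         (3000, 256),
--         (16000, 384),
--         (float("inf"), 512),
--     ],
-- }
--
-- CAP = None
--
-- def choose_T(layer: int, n_delta: int) -> int: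
--     if layer == 0:
--         return T0_FIXED
--     for thr, T in BUCKETS[layer]:
--         if n_delta <= thr:
--             if CAP is not None and layer in CAP:
--                 return int(min(T, CAP[layer]))
--             return int(T)
--     raise RuntimeError("Bucket config error")
-- ===== SOURCE B (Python) =====
-- T0_FIXED = 100
--
-- # per-layer: (two finite thresholds, three token counts); index = number of thresholds exceeded
-- _BOUNDS = {
--     1: (1000, 4000, (64, 128, 256)),
--     2: (2000, 8000, (128, 256, 384)),
--     3: (3000, 16000, (256, 384, 512)),
-- }
--
--
-- def choose_T(layer: int, n_delta: int) -> int: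
--     if layer == 0:
--         return T0_FIXED
--     t1, t2, toks = _BOUNDS[layer]
--     return toks[(n_delta > t1) + (n_delta > t2)]
-- ===== Notes on version B (the rewrite author's own statement) =====
-- stated objective: simpler
-- what changed: Replaces the linear scan over (threshold, token) bucket pairs with a loop-free arithmetic index: the number of finite thresholds exceeded selects the token count from a per-layer triple, so neither the inf sentinel nor the unreachable RuntimeError is needed.
-- outside the precondition, e.g. on choose_T(4, 100): A raises KeyError, B raises KeyError
import Mathlib
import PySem

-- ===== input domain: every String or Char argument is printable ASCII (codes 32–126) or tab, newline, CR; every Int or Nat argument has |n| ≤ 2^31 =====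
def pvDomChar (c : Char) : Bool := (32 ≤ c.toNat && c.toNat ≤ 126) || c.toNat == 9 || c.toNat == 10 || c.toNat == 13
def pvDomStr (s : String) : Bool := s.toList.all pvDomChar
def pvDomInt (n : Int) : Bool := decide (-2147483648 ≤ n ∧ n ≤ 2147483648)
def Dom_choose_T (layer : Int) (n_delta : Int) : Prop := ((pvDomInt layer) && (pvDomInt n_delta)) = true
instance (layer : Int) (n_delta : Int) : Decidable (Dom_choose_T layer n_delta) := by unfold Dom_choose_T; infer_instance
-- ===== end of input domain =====

-- B replaces the bucket scan with a loop-free arithmetic index into per-layer token triples (objective: simpler).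
-- Pre_ excludes layers outside {0,1,2,3}, where A raises KeyError.

-- ===== PORT A =====
-- BUCKETS[layer]; thresholds as Option Int, none = float('inf') (n_delta <= inf is always true)
def pvBuckets (layer : Int) : Option (List (Option Int × Int)) :=
  if layer = 1 then some [(some 1000, 64), (some 4000, 128), (none, 256)]
  else if layer = 2 then some [(some 2000, 128), (some 8000, 256), (none, 384)]
  else if layer = 3 then some [(some 3000, 256), (some 16000, 384), (none, 512)]
  else none

-- the 'for thr, T in BUCKETS[layer]' loop; [] case is Python's RuntimeError (unreachable)
def pvScan (n_delta : Int) : List (Option Int × Int) → Int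
  | [] => 0
  | (thr, t) :: rest =>
      match thr with
      | none => t
      | some b => if n_delta ≤ b then t else pvScan n_delta rest

def choose_T (layer : Int) (n_delta : Int) : Int :=
  if layer = 0 then 100
  else
    match pvBuckets layer with
    | none => 0  -- KeyError in Python; excluded by Pre_choose_T
    | some bs => pvScan n_delta bs

-- ===== PORT B =====
def pvBounds (layer : Int) : Option (Int × Int × (Int × Int × Int)) :=
  PySem.Dict.get? (PySem.Dict.ofList
    [((1 : Int), ((1000 : Int), (4000 : Int), ((64 : Int), (128 : Int), (256 : Int)))),
     (2, (2000, 8000, (128, 256, 384))),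
     (3, (3000, 16000, (256, 384, 512)))]) layer

def choose_T_alt (layer : Int) (n_delta : Int) : Int :=
  if layer = 0 then 100
  else
    match pvBounds layer with
    | none => 0  -- KeyError in Python; excluded by Pre_choose_T
    | some (t1, t2, toks) =>
      let i : Int := (if n_delta > t1 then 1 else 0) + (if n_delta > t2 then 1 else 0)
      -- toks[i] on the 3-tuple
      if i = 0 then toks.1 else if i = 1 then toks.2.1 else toks.2.2

-- ===== PRECONDITION & SPEC =====
-- A raises KeyError on BUCKETS[layer] for layer outside {0,1,2,3}; those inputs are excluded.
def Pre_choose_T (layer : Int) (n_delta : Int) : Prop :=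
  layer = 0 ∨ layer = 1 ∨ layer = 2 ∨ layer = 3
instance (layer : Int) (n_delta : Int) : Decidable (Pre_choose_T layer n_delta) := by
  unfold Pre_choose_T; infer_instance
def pvWitness_choose_T : Int × Int := (1, 500)
def Spec_choose_T (layer : Int) (n_delta : Int) (out : Int) : Prop := out = choose_T_alt layer n_delta
instance (layer : Int) (n_delta : Int) (out : Int) : Decidable (Spec_choose_T layer n_delta out) := by unfold Spec_choose_T; infer_instance

-- ===== CLAIM (what is proved, stated in full; the proofs are below) =====
def Claim_equal_choose_T : Prop := ∀ (layer : Int) (n_delta : Int), Dom_choose_T layer n_delta → Pre_choose_T layer n_delta → Spec_choose_T layer n_delta (choose_T layer n_delta)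

-- ===== LEMMAS AND PROOFS =====

-- ===== VERDICT (by name: the statement is the Claim_ definition above) =====
theorem pvBounds_one : pvBounds 1 = some (1000, 4000, (64, 128, 256)) := by decide
theorem pvBounds_two : pvBounds 2 = some (2000, 8000, (128, 256, 384)) := by decide
theorem pvBounds_three : pvBounds 3 = some (3000, 16000, (256, 384, 512)) := by decide

theorem choose_T_spec : Claim_equal_choose_T := by
  intro layer n_delta _ hpre
  unfold Spec_choose_T
  rcases hpre with h | h | h | h <;> subst h <;>
    simp [choose_T, choose_T_alt, pvBuckets, pvScan, pvBounds_one, pvBounds_two, pvBounds_three] <;>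
    split_ifs <;> omega
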